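-- pv_equiv track=rewrite | github.com/persona613/leetcode_practices | 2832. Maximal Range That Each Element Is Maximum in It.py | maximumLengthOfRanges
-- ===== SOURCE A (Python) =====
-- from typing import List
--
-- def maximumLengthOfRanges(nums: List[int]) -> List[int]:
--     n = len(nums)
--     res = [-1] * n
--     # decreasing monotonic stack
--     stk = []
--     for i in range(n):
--         curr = nums[i]
--         while stk and stk[-1][0] < curr:
--             _, pi = stk.pop()
--             res[pi] += i - pi
--         stk.append((curr, i))
--     while stk:
--         _, pi = stk.pop()
--         res[pi] += n - pi
--
--     # from right side
--     for i in range(n - 1, -1, -1):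
--         curr = nums[i]
--         while stk and stk[-1][0] < curr:
--             _, pi = stk.pop()
--             res[pi] += pi - i
--         stk.append((curr, i))
--     while stk:
--         _, pi = stk.pop()
--         res[pi] += pi + 1
--
--     return res
-- ===== SOURCE B (Python) =====
-- def maximumLengthOfRanges(nums):
--     n = len(nums)
--     res = []
--     for i in range(n):
--         x = nums[i]
--         l = i - 1
--         while l >= 0 and nums[l] <= x:
--             l -= 1
--         r = i + 1
--         while r < n and nums[r] <= x:
--             r += 1
--         res.append(r - l - 1)
--     return res
-- ===== Notes on version B (the rewrite author's own statement) =====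
-- stated objective: simpler
-- what changed: Replaces A's two monotonic-stack passes that accumulate increments into a preallocated res array with a direct per-index scan to the nearest strictly-greater element on each side, returning right - left - 1 for each element.
import Mathlib
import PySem

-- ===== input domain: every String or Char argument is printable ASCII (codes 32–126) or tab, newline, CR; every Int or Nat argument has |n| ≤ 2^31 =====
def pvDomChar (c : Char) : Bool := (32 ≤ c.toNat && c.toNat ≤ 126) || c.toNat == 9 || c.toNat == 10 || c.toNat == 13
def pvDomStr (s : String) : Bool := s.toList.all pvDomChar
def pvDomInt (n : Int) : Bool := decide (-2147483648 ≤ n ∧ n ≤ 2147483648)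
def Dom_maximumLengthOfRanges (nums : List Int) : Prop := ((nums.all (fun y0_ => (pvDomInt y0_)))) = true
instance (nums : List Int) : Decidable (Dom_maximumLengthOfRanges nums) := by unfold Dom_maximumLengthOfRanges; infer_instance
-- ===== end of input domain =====

-- B replaces A's two monotonic-stack accumulation passes by a direct per-index scan for the
-- nearest strictly greater element on each side (objective: simpler; not faster — B is O(n^2) vs A's O(n)).

-- ===== PORT A =====
-- inner `while stk and stk[-1][0] < curr` of the left-to-right pass: pop and `res[pi] += i - pi`
def pvPopR (curr : Int) (i : Nat) : List (Int × Nat) → List Int → (List (Int × Nat)) × List Int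
  | [], res => ([], res)
  | (v, pi) :: rest, res =>
    if v < curr then pvPopR curr i rest (res.set pi (res.getD pi 0 + ((i : Int) - (pi : Int))))
    else ((v, pi) :: rest, res)

-- `while stk: res[pi] += n - pi`
def pvFlushR (n : Nat) : List (Int × Nat) → List Int → List Int
  | [], res => res
  | (_, pi) :: rest, res => pvFlushR n rest (res.set pi (res.getD pi 0 + ((n : Int) - (pi : Int))))

-- inner while of the right-to-left pass: pop and `res[pi] += pi - i`
def pvPopL (curr : Int) (i : Nat) : List (Int × Nat) → List Int → (List (Int × Nat)) × List Int
  | [], res => ([], res)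
  | (v, pi) :: rest, res =>
    if v < curr then pvPopL curr i rest (res.set pi (res.getD pi 0 + ((pi : Int) - (i : Int))))
    else ((v, pi) :: rest, res)

-- `while stk: res[pi] += pi + 1`
def pvFlushL : List (Int × Nat) → List Int → List Int
  | [], res => res
  | (_, pi) :: rest, res => pvFlushL rest (res.set pi (res.getD pi 0 + ((pi : Int) + 1)))

-- body of `for i in range(n)` (first pass); state = (stk, res); stack head = python stk[-1]
def pvStep1 (nums : List Int) (s : List (Int × Nat) × List Int) (i : Nat) : List (Int × Nat) × List Int :=
  let curr := nums.getD i 0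
  let t := pvPopR curr i s.1 s.2
  ((curr, i) :: t.1, t.2)

-- body of `for i in range(n - 1, -1, -1)` (second pass)
def pvStep2 (nums : List Int) (s : List (Int × Nat) × List Int) (i : Nat) : List (Int × Nat) × List Int :=
  let curr := nums.getD i 0
  let t := pvPopL curr i s.1 s.2
  ((curr, i) :: t.1, t.2)

def maximumLengthOfRanges (nums : List Int) : List Int :=
  let n := nums.length
  let s1 := (List.range n).foldl (pvStep1 nums) ([], List.replicate n (-1 : Int))
  let res2 := pvFlushR n s1.1 s1.2
  let s3 := ((List.range n).reverse).foldl (pvStep2 nums) ([], res2)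
  pvFlushL s3.1 s3.2

-- ===== PORT B =====
-- `while r < n and nums[r] <= x: r += 1`
def pvScanR (nums : List Int) (n : Nat) (x : Int) (r : Nat) : Nat :=
  if r < n then
    (if nums.getD r 0 ≤ x then pvScanR nums n x (r + 1) else r)
  else r
termination_by n - r
decreasing_by omega

-- `while l >= 0 and nums[l] <= x: l -= 1`
def pvScanL (nums : List Int) (x : Int) (l : Int) : Int :=
  if 0 ≤ l then
    (if nums.getD l.toNat 0 ≤ x then pvScanL nums x (l - 1) else l)
  else l
termination_by (l + 1).toNat
decreasing_by omega

def maximumLengthOfRanges_alt (nums : List Int) : List Int :=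
  let n := nums.length
  (List.range n).map (fun i =>
    let x := nums.getD i 0
    let l := pvScanL nums x ((i : Int) - 1)
    let r := pvScanR nums n x (i + 1)
    ((r : Int) - l - 1))

-- ===== PRECONDITION & SPEC =====
def Spec_maximumLengthOfRanges (nums : List Int) (out : List Int) : Prop := out = maximumLengthOfRanges_alt nums
instance (nums : List Int) (out : List Int) : Decidable (Spec_maximumLengthOfRanges nums out) := by unfold Spec_maximumLengthOfRanges; infer_instance

-- ===== CLAIM (what is proved, stated in full; the proofs are below) =====
def Claim_equal_maximumLengthOfRanges : Prop := ∀ (nums : List Int), Dom_maximumLengthOfRanges nums → Spec_maximumLengthOfRanges nums (maximumLengthOfRanges nums)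

-- ===== LEMMAS AND PROOFS =====

-- value at index t (`nums[t]` for the in-range indices both programs use)
def pvG (nums : List Int) (t : Nat) : Int := nums.getD t 0

-- B's two bounds, as they appear inside maximumLengthOfRanges_alt
def pvR (nums : List Int) (t : Nat) : Nat := pvScanR nums nums.length (pvG nums t) (t + 1)
def pvL (nums : List Int) (t : Nat) : Int := pvScanL nums (pvG nums t) ((t : Int) - 1)

theorem pv_getD_set_self (l : List Int) (i : Nat) (v : Int) (h : i < l.length) :
    (l.set i v).getD i 0 = v := by
  rw [List.getD_eq_getElem _ _ (by simpa using h)]; simp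

theorem pv_getD_set_ne (l : List Int) (i t : Nat) (v : Int) (h : t ≠ i) :
    (l.set i v).getD t 0 = l.getD t 0 := by
  simp only [List.getD, List.getElem?_set, if_neg (Ne.symm h)]

-- characterization of pvScanR: it returns the unique m with the first-strictly-greater property
theorem pvScanR_eq (nums : List Int) (n : Nat) (x : Int) :
    ∀ (d r m : Nat), m - r ≤ d → r ≤ m → m ≤ n →
    (∀ k, r ≤ k → k < m → nums.getD k 0 ≤ x) →
    (m < n → x < nums.getD m 0) → pvScanR nums n x r = m := by
  intro d
  induction d with
  | zero =>
    intro r m h1 h2 h3 hmid hstop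
    have hrm : r = m := by omega
    subst hrm
    rw [pvScanR]
    split_ifs with ha hb
    · exact absurd hb (by have := hstop ha; omega)
    · rfl
    · rfl
  | succ d ih =>
    intro r m h1 h2 h3 hmid hstop
    by_cases hrm : r = m
    · subst hrm
      rw [pvScanR]
      split_ifs with ha hb
      · exact absurd hb (by have := hstop ha; omega)
      · rfl
      · rfl
    · have hrm' : r < m := by omega
      have hrn : r < n := by omega
      have hx : nums.getD r 0 ≤ x := hmid r le_rfl hrm'
      rw [pvScanR]
      rw [if_pos hrn, if_pos hx]
      exact ih (r + 1) m (by omega) (by omega) h3 (fun k hk1 hk2 => hmid k (by omega) hk2) hstop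

-- characterization of pvScanL
theorem pvScanL_eq (nums : List Int) (x : Int) :
    ∀ (d : Nat) (l m : Int), (l - m).toNat ≤ d → m ≤ l → -1 ≤ m →
    (∀ k : Int, m < k → k ≤ l → nums.getD k.toNat 0 ≤ x) →
    (0 ≤ m → x < nums.getD m.toNat 0) → pvScanL nums x l = m := by
  intro d
  induction d with
  | zero =>
    intro l m h1 h2 h3 hmid hstop
    have hlm : l = m := by omega
    subst hlm
    rw [pvScanL]
    split_ifs with ha hb
    · exact absurd hb (by have := hstop ha; omega)
    · rfl
    · rfl
  | succ d ih =>
    intro l m h1 h2 h3 hmid hstop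
    by_cases hlm : l = m
    · subst hlm
      rw [pvScanL]
      split_ifs with ha hb
      · exact absurd hb (by have := hstop ha; omega)
      · rfl
      · rfl
    · have hlm' : m < l := by omega
      have hl0 : (0 : Int) ≤ l := by omega
      have hx : nums.getD l.toNat 0 ≤ x := hmid l hlm' le_rfl
      rw [pvScanL]
      rw [if_pos hl0, if_pos hx]
      exact ih (l - 1) m (by omega) (by omega) h3 (fun k hk1 hk2 => hmid k hk1 (by omega)) hstop

-- membership in takeWhile/dropWhile of a value-monotone stack
theorem pv_mem_takeWhile (v : Nat → Int) (c : Int) :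
    ∀ (js : List Nat), js.Pairwise (fun a b => v a ≤ v b) →
    ∀ t, (t ∈ js.takeWhile (fun j => decide (v j < c)) ↔ t ∈ js ∧ v t < c) := by
  intro js
  induction js with
  | nil => intro _ t; simp
  | cons j tl ih =>
    intro hpw t
    rw [List.pairwise_cons] at hpw
    obtain ⟨hj, htl⟩ := hpw
    by_cases hc : v j < c
    · rw [List.takeWhile_cons_of_pos (by simpa using hc)]
      simp only [List.mem_cons, ih htl t]
      constructor
      · rintro (rfl | ⟨h1, h2⟩)
        · exact ⟨Or.inl rfl, hc⟩
        · exact ⟨Or.inr h1, h2⟩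
      · rintro ⟨rfl | h1, h2⟩
        · exact Or.inl rfl
        · exact Or.inr ⟨h1, h2⟩
    · rw [List.takeWhile_cons_of_neg (by simpa using hc)]
      simp only [List.not_mem_nil, false_iff, List.mem_cons]
      rintro ⟨rfl | ht, hvt⟩
      · exact hc hvt
      · exact hc (lt_of_le_of_lt (hj t ht) hvt)

theorem pv_mem_dropWhile (v : Nat → Int) (c : Int) :
    ∀ (js : List Nat), js.Pairwise (fun a b => v a ≤ v b) →
    ∀ t, (t ∈ js.dropWhile (fun j => decide (v j < c)) ↔ t ∈ js ∧ ¬ v t < c) := by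
  intro js
  induction js with
  | nil => intro _ t; simp
  | cons j tl ih =>
    intro hpw t
    rw [List.pairwise_cons] at hpw
    obtain ⟨hj, htl⟩ := hpw
    by_cases hc : v j < c
    · rw [List.dropWhile_cons_of_pos (by simpa using hc)]
      simp only [ih htl t, List.mem_cons]
      constructor
      · rintro ⟨h1, h2⟩; exact ⟨Or.inr h1, h2⟩
      · rintro ⟨rfl | h1, h2⟩
        · exact absurd hc h2
        · exact ⟨h1, h2⟩
    · rw [List.dropWhile_cons_of_neg (by simpa using hc)]
      simp only [List.mem_cons]
      constructor
      · rintro (rfl | ht)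
        · exact ⟨Or.inl rfl, hc⟩
        · refine ⟨Or.inr ht, fun hvt => hc ?_⟩
          exact lt_of_le_of_lt (hj t ht) hvt
      · rintro ⟨h1, _⟩; exact h1

-- pvPopR: stack result = dropWhile, res result pointwise
theorem pvPopR_fst (nums : List Int) (curr : Int) (i : Nat) :
    ∀ (js : List Nat) (res : List Int),
    (pvPopR curr i (js.map (fun j => (pvG nums j, j))) res).1 =
      (js.dropWhile (fun j => decide (pvG nums j < curr))).map (fun j => (pvG nums j, j)) := by
  intro js
  induction js with
  | nil => intro res; simp [pvPopR]
  | cons j tl ih =>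
    intro res
    by_cases hc : pvG nums j < curr
    · simp only [List.map_cons, pvPopR, if_pos hc, List.dropWhile_cons, decide_eq_true hc]
      exact ih _
    · simp [pvPopR, hc]

theorem pvPopR_len (nums : List Int) (curr : Int) (i : Nat) :
    ∀ (js : List Nat) (res : List Int),
    (pvPopR curr i (js.map (fun j => (pvG nums j, j))) res).2.length = res.length := by
  intro js
  induction js with
  | nil => intro res; simp [pvPopR]
  | cons j tl ih =>
    intro res
    by_cases hc : pvG nums j < curr
    · simp only [List.map_cons, pvPopR, if_pos hc]
      rw [ih]
      simp
    · simp [pvPopR, if_neg hc]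

theorem pvPopR_getD (nums : List Int) (curr : Int) (i : Nat) :
    ∀ (js : List Nat) (res : List Int), js.Nodup → (∀ j ∈ js, j < res.length) →
    ∀ t, (pvPopR curr i (js.map (fun j => (pvG nums j, j))) res).2.getD t 0 =
      if t ∈ js.takeWhile (fun j => decide (pvG nums j < curr)) then
        res.getD t 0 + ((i : Int) - (t : Int)) else res.getD t 0 := by
  intro js
  induction js with
  | nil => intro res _ _ t; simp [pvPopR]
  | cons j tl ih =>
    intro res hnd hbnd t
    rw [List.nodup_cons] at hnd
    obtain ⟨hj, htl⟩ := hnd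
    have hjlen : j < res.length := hbnd j List.mem_cons_self
    by_cases hc : pvG nums j < curr
    · rw [List.takeWhile_cons_of_pos (by simpa using hc)]
      simp only [List.map_cons, pvPopR]
      rw [if_pos hc]
      rw [ih _ htl (fun x hx => by rw [List.length_set]; exact hbnd x (List.mem_cons_of_mem _ hx)) t]
      by_cases htj : t = j
      · subst htj
        have hnt : t ∉ tl.takeWhile (fun j => decide (pvG nums j < curr)) :=
          fun hmem => hj ((List.takeWhile_sublist _).mem hmem)
        rw [if_neg hnt, if_pos List.mem_cons_self]
        rw [pv_getD_set_self _ _ _ hjlen]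
      · rw [pv_getD_set_ne _ _ _ _ htj]
        by_cases hmem : t ∈ tl.takeWhile (fun j => decide (pvG nums j < curr))
        · rw [if_pos hmem, if_pos (List.mem_cons_of_mem _ hmem)]
        · rw [if_neg hmem, if_neg (by simp [htj, hmem])]
    · rw [List.takeWhile_cons_of_neg (by simpa using hc)]
      simp only [List.map_cons, pvPopR]
      rw [if_neg hc]
      simp

theorem pvPopL_fst (nums : List Int) (curr : Int) (i : Nat) :
    ∀ (js : List Nat) (res : List Int),
    (pvPopL curr i (js.map (fun j => (pvG nums j, j))) res).1 =
      (js.dropWhile (fun j => decide (pvG nums j < curr))).map (fun j => (pvG nums j, j)) := by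
  intro js
  induction js with
  | nil => intro res; simp [pvPopL]
  | cons j tl ih =>
    intro res
    by_cases hc : pvG nums j < curr
    · simp only [List.map_cons, pvPopL, if_pos hc, List.dropWhile_cons, decide_eq_true hc]
      exact ih _
    · simp [pvPopL, hc]

theorem pvPopL_len (nums : List Int) (curr : Int) (i : Nat) :
    ∀ (js : List Nat) (res : List Int),
    (pvPopL curr i (js.map (fun j => (pvG nums j, j))) res).2.length = res.length := by
  intro js
  induction js with
  | nil => intro res; simp [pvPopL]
  | cons j tl ih =>
    intro res
    by_cases hc : pvG nums j < curr
    · simp only [List.map_cons, pvPopL, if_pos hc]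
      rw [ih]
      simp
    · simp [pvPopL, if_neg hc]

theorem pvPopL_getD (nums : List Int) (curr : Int) (i : Nat) :
    ∀ (js : List Nat) (res : List Int), js.Nodup → (∀ j ∈ js, j < res.length) →
    ∀ t, (pvPopL curr i (js.map (fun j => (pvG nums j, j))) res).2.getD t 0 =
      if t ∈ js.takeWhile (fun j => decide (pvG nums j < curr)) then
        res.getD t 0 + ((t : Int) - (i : Int)) else res.getD t 0 := by
  intro js
  induction js with
  | nil => intro res _ _ t; simp [pvPopL]
  | cons j tl ih =>
    intro res hnd hbnd t
    rw [List.nodup_cons] at hnd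
    obtain ⟨hj, htl⟩ := hnd
    have hjlen : j < res.length := hbnd j List.mem_cons_self
    by_cases hc : pvG nums j < curr
    · rw [List.takeWhile_cons_of_pos (by simpa using hc)]
      simp only [List.map_cons, pvPopL]
      rw [if_pos hc]
      rw [ih _ htl (fun x hx => by rw [List.length_set]; exact hbnd x (List.mem_cons_of_mem _ hx)) t]
      by_cases htj : t = j
      · subst htj
        have hnt : t ∉ tl.takeWhile (fun j => decide (pvG nums j < curr)) :=
          fun hmem => hj ((List.takeWhile_sublist _).mem hmem)
        rw [if_neg hnt, if_pos List.mem_cons_self]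
        rw [pv_getD_set_self _ _ _ hjlen]
      · rw [pv_getD_set_ne _ _ _ _ htj]
        by_cases hmem : t ∈ tl.takeWhile (fun j => decide (pvG nums j < curr))
        · rw [if_pos hmem, if_pos (List.mem_cons_of_mem _ hmem)]
        · rw [if_neg hmem, if_neg (by simp [htj, hmem])]
    · rw [List.takeWhile_cons_of_neg (by simpa using hc)]
      simp only [List.map_cons, pvPopL]
      rw [if_neg hc]
      simp

theorem pvFlushR_len (nums : List Int) (n : Nat) :
    ∀ (js : List Nat) (res : List Int),
    (pvFlushR n (js.map (fun j => (pvG nums j, j))) res).length = res.length := by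
  intro js
  induction js with
  | nil => intro res; simp [pvFlushR]
  | cons j tl ih =>
    intro res
    simp only [List.map_cons, pvFlushR]
    rw [ih]
    simp

theorem pvFlushR_getD (nums : List Int) (n : Nat) :
    ∀ (js : List Nat) (res : List Int), js.Nodup → (∀ j ∈ js, j < res.length) →
    ∀ t, (pvFlushR n (js.map (fun j => (pvG nums j, j))) res).getD t 0 =
      if t ∈ js then res.getD t 0 + ((n : Int) - (t : Int)) else res.getD t 0 := by
  intro js
  induction js with
  | nil => intro res _ _ t; simp [pvFlushR]
  | cons j tl ih =>
    intro res hnd hbnd t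
    rw [List.nodup_cons] at hnd
    obtain ⟨hj, htl⟩ := hnd
    have hjlen : j < res.length := hbnd j List.mem_cons_self
    simp only [List.map_cons, pvFlushR]
    rw [ih _ htl (fun x hx => by rw [List.length_set]; exact hbnd x (List.mem_cons_of_mem _ hx)) t]
    by_cases htj : t = j
    · subst htj
      rw [if_neg hj, if_pos List.mem_cons_self, pv_getD_set_self _ _ _ hjlen]
    · rw [pv_getD_set_ne _ _ _ _ htj]
      by_cases hmem : t ∈ tl
      · rw [if_pos hmem, if_pos (List.mem_cons_of_mem _ hmem)]
      · rw [if_neg hmem, if_neg (by simp [htj, hmem])]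

theorem pvFlushL_len (nums : List Int) :
    ∀ (js : List Nat) (res : List Int),
    (pvFlushL (js.map (fun j => (pvG nums j, j))) res).length = res.length := by
  intro js
  induction js with
  | nil => intro res; simp [pvFlushL]
  | cons j tl ih =>
    intro res
    simp only [List.map_cons, pvFlushL]
    rw [ih]
    simp

theorem pvFlushL_getD (nums : List Int) :
    ∀ (js : List Nat) (res : List Int), js.Nodup → (∀ j ∈ js, j < res.length) →
    ∀ t, (pvFlushL (js.map (fun j => (pvG nums j, j))) res).getD t 0 =
      if t ∈ js then res.getD t 0 + ((t : Int) + 1) else res.getD t 0 := by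
  intro js
  induction js with
  | nil => intro res _ _ t; simp [pvFlushL]
  | cons j tl ih =>
    intro res hnd hbnd t
    rw [List.nodup_cons] at hnd
    obtain ⟨hj, htl⟩ := hnd
    have hjlen : j < res.length := hbnd j List.mem_cons_self
    simp only [List.map_cons, pvFlushL]
    rw [ih _ htl (fun x hx => by rw [List.length_set]; exact hbnd x (List.mem_cons_of_mem _ hx)) t]
    by_cases htj : t = j
    · subst htj
      rw [if_neg hj, if_pos List.mem_cons_self, pv_getD_set_self _ _ _ hjlen]
    · rw [pv_getD_set_ne _ _ _ _ htj]
      by_cases hmem : t ∈ tl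
      · rw [if_pos hmem, if_pos (List.mem_cons_of_mem _ hmem)]
      · rw [if_neg hmem, if_neg (by simp [htj, hmem])]

-- invariant of A's first (left-to-right) pass after processing indices < i
def pvInv1 (nums : List Int) (i : Nat) (s : List (Int × Nat) × List Int) : Prop :=
  ∃ js : List Nat,
    s.1 = js.map (fun j => (pvG nums j, j)) ∧
    js.Pairwise (· > ·) ∧
    js.Pairwise (fun a b => pvG nums a ≤ pvG nums b) ∧
    (∀ j, j ∈ js ↔ j < i ∧ ∀ k, j < k → k < i → pvG nums k ≤ pvG nums j) ∧
    s.2.length = nums.length ∧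
    (∀ t, t < nums.length →
      s.2.getD t 0 = if t < i ∧ t ∉ js then (pvR nums t : Int) - t - 1 else -1)

theorem pvStep1_inv (nums : List Int) (i : Nat) (s : List (Int × Nat) × List Int)
    (hi : i < nums.length) (h : pvInv1 nums i s) : pvInv1 nums (i + 1) (pvStep1 nums s i) := by
  
  obtain ⟨js, hstk, hgt, hmono, hmem, hlen, hres⟩ := h
  have hnd : js.Nodup := hgt.imp (fun hab => Nat.ne_of_gt hab)
  have hjslt : ∀ j ∈ js, j < i := fun j hj => ((hmem j).1 hj).1
  have hbnd : ∀ j ∈ js, j < s.2.length := fun j hj => by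
    have := hjslt j hj; omega
  have hkeepm := pv_mem_dropWhile (pvG nums) (pvG nums i) js hmono
  have hpopm := pv_mem_takeWhile (pvG nums) (pvG nums i) js hmono
  refine ⟨i :: js.dropWhile (fun j => decide (pvG nums j < pvG nums i)), ?_, ?_, ?_, ?_, ?_, ?_⟩
  · show (pvG nums i, i) :: (pvPopR (pvG nums i) i s.1 s.2).1 = _
    rw [hstk, pvPopR_fst]
    rfl
  · refine List.pairwise_cons.2 ⟨fun j hj => ?_, hgt.sublist (List.dropWhile_sublist _)⟩
    exact hjslt j ((hkeepm j).1 hj).1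
  · refine List.pairwise_cons.2 ⟨fun j hj => ?_, hmono.sublist (List.dropWhile_sublist _)⟩
    have := ((hkeepm j).1 hj).2
    omega
  · intro j
    rw [List.mem_cons, hkeepm j]
    constructor
    · rintro (rfl | ⟨hjs, hge⟩)
      · exact ⟨by omega, fun k h1 h2 => by omega⟩
      · obtain ⟨hlt, hall⟩ := (hmem j).1 hjs
        refine ⟨by omega, fun k h1 h2 => ?_⟩
        by_cases hk : k = i
        · subst hk; omega
        · exact hall k h1 (by omega)
    · rintro ⟨hlt, hall⟩
      by_cases hji : j = i
      · exact Or.inl hji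
      · have hjlt : j < i := by omega
        refine Or.inr ⟨(hmem j).2 ⟨hjlt, fun k h1 h2 => hall k h1 (by omega)⟩, ?_⟩
        have := hall i hjlt (by omega)
        omega
  · show (pvPopR (pvG nums i) i s.1 s.2).2.length = _
    rw [hstk, pvPopR_len]
    exact hlen
  · intro t ht
    show (pvPopR (pvG nums i) i s.1 s.2).2.getD t 0 = _
    rw [hstk, pvPopR_getD nums (pvG nums i) i js s.2 hnd hbnd t, hres t ht]
    by_cases hp : t ∈ js.takeWhile (fun j => decide (pvG nums j < pvG nums i))
    · obtain ⟨htjs, htlt⟩ := (hpopm t).1 hp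
      have hti : t < i := hjslt t htjs
      rw [if_pos hp, if_neg (by simp [htjs]), if_pos ?side]
      case side =>
        refine ⟨by omega, fun hmem' => ?_⟩
        rcases List.mem_cons.1 hmem' with rfl | h
        · omega
        · exact absurd ((hkeepm t).1 h).2 (by simpa using htlt)
      have hR : pvR nums t = i := by
        refine pvScanR_eq nums nums.length (pvG nums t) nums.length (t + 1) i (by omega)
          (by omega) (by omega) (fun k h1 h2 => ((hmem t).1 htjs).2 k (by omega) h2) (fun _ => htlt)
      rw [hR]
      ring
    · rw [if_neg hp]
      by_cases hti : t = i
      · subst hti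
        rw [if_neg (fun h => absurd h.1 (by omega)), if_neg (fun h => h.2 List.mem_cons_self)]
      · by_cases htjs : t ∈ js
        · have hge : ¬ pvG nums t < pvG nums i := fun hlt => hp ((hpopm t).2 ⟨htjs, hlt⟩)
          have htk : t ∈ js.dropWhile (fun j => decide (pvG nums j < pvG nums i)) :=
            (hkeepm t).2 ⟨htjs, hge⟩
          rw [if_neg (by simp [htjs]), if_neg (by simp [htk])]
        · have htk : t ∉ js.dropWhile (fun j => decide (pvG nums j < pvG nums i)) :=
            fun h => htjs ((hkeepm t).1 h).1
          by_cases hlt : t < i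
          · rw [if_pos ⟨hlt, htjs⟩, if_pos ⟨by omega, by simp [htk, hti]⟩]
          · rw [if_neg (by omega), if_neg (by omega)]

theorem pvPass1 (nums : List Int) :
    ∀ k, k ≤ nums.length →
    pvInv1 nums k ((List.range k).foldl (pvStep1 nums) ([], List.replicate nums.length (-1 : Int))) := by
  
  intro k
  induction k with
  | zero =>
    intro _
    refine ⟨[], by simp [List.range_zero], by simp, by simp, ?_, by simp, ?_⟩
    · intro j
      simp
    · intro t ht
      simp only [List.range_zero, List.foldl_nil]
      rw [if_neg (by omega)]
      simp [List.getD, ht]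
  | succ k ih =>
    intro hk
    rw [List.range_succ, List.foldl_append, List.foldl_cons, List.foldl_nil]
    exact pvStep1_inv nums k _ (by omega) (ih (by omega))

-- after pass 1 and the flush, res holds the right-bound contribution
theorem pvRes1 (nums : List Int) :
    (pvFlushR nums.length
        ((List.range nums.length).foldl (pvStep1 nums) ([], List.replicate nums.length (-1 : Int))).1
        ((List.range nums.length).foldl (pvStep1 nums) ([], List.replicate nums.length (-1 : Int))).2).length
      = nums.length ∧
    ∀ t, t < nums.length →
      (pvFlushR nums.length
        ((List.range nums.length).foldl (pvStep1 nums) ([], List.replicate nums.length (-1 : Int))).1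
        ((List.range nums.length).foldl (pvStep1 nums) ([], List.replicate nums.length (-1 : Int))).2).getD t 0
      = (pvR nums t : Int) - t - 1 := by
  
  obtain ⟨js, hstk, hgt, hmono, hmem, hlen, hres⟩ := pvPass1 nums nums.length le_rfl
  have hnd : js.Nodup := hgt.imp (fun hab => Nat.ne_of_gt hab)
  have hbnd : ∀ j ∈ js, j <
      ((List.range nums.length).foldl (pvStep1 nums) ([], List.replicate nums.length (-1 : Int))).2.length := by
    intro j hj
    have := ((hmem j).1 hj).1
    omega
  constructor
  · rw [hstk, pvFlushR_len, hlen]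
  · intro t ht
    rw [hstk, pvFlushR_getD nums nums.length js _ hnd hbnd t, hres t ht]
    by_cases hjs : t ∈ js
    · have hR : pvR nums t = nums.length := by
        refine pvScanR_eq nums nums.length (pvG nums t) nums.length (t + 1) nums.length
          (by omega) (by omega) le_rfl (fun k h1 h2 => ((hmem t).1 hjs).2 k (by omega) h2)
          (fun h => absurd h (by omega))
      rw [if_pos hjs, if_neg (by simp [hjs]), hR]
      ring
    · rw [if_neg hjs, if_pos ⟨ht, hjs⟩]

-- invariant of A's second (right-to-left) pass after processing indices ≥ i
def pvInv2 (nums : List Int) (i : Nat) (s : List (Int × Nat) × List Int) : Prop :=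
  ∃ js : List Nat,
    s.1 = js.map (fun j => (pvG nums j, j)) ∧
    js.Pairwise (· < ·) ∧
    js.Pairwise (fun a b => pvG nums a ≤ pvG nums b) ∧
    (∀ j, j ∈ js ↔ i ≤ j ∧ j < nums.length ∧ ∀ k, i ≤ k → k < j → pvG nums k ≤ pvG nums j) ∧
    s.2.length = nums.length ∧
    (∀ t, t < nums.length →
      s.2.getD t 0 = (pvR nums t : Int) - t - 1 +
        (if i ≤ t ∧ t ∉ js then (t : Int) - pvL nums t else 0))

theorem pvStep2_inv (nums : List Int) (i : Nat) (s : List (Int × Nat) × List Int)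
    (hi : i < nums.length) (h : pvInv2 nums (i + 1) s) : pvInv2 nums i (pvStep2 nums s i) := by
  
  obtain ⟨js, hstk, hlt, hmono, hmem, hlen, hres⟩ := h
  have hnd : js.Nodup := hlt.imp (fun hab => Nat.ne_of_lt hab)
  have hjsgt : ∀ j ∈ js, i < j ∧ j < nums.length := by
    intro j hj
    have h1 := ((hmem j).1 hj).1
    have h2 := ((hmem j).1 hj).2.1
    omega
  have hbnd : ∀ j ∈ js, j < s.2.length := fun j hj => by
    have := hjsgt j hj; omega
  have hkeepm := pv_mem_dropWhile (pvG nums) (pvG nums i) js hmono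
  have hpopm := pv_mem_takeWhile (pvG nums) (pvG nums i) js hmono
  refine ⟨i :: js.dropWhile (fun j => decide (pvG nums j < pvG nums i)), ?_, ?_, ?_, ?_, ?_, ?_⟩
  · show (pvG nums i, i) :: (pvPopL (pvG nums i) i s.1 s.2).1 = _
    rw [hstk, pvPopL_fst]
    rfl
  · refine List.pairwise_cons.2 ⟨fun j hj => ?_, hlt.sublist (List.dropWhile_sublist _)⟩
    exact (hjsgt j ((hkeepm j).1 hj).1).1
  · refine List.pairwise_cons.2 ⟨fun j hj => ?_, hmono.sublist (List.dropWhile_sublist _)⟩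
    have := ((hkeepm j).1 hj).2
    omega
  · intro j
    rw [List.mem_cons, hkeepm j]
    constructor
    · rintro (rfl | ⟨hjs, hge⟩)
      · exact ⟨le_rfl, hi, fun k h1 h2 => by omega⟩
      · obtain ⟨h1, h2, hall⟩ := (hmem j).1 hjs
        refine ⟨by omega, h2, fun k hk1 hk2 => ?_⟩
        by_cases hk : k = i
        · subst hk; omega
        · exact hall k (by omega) hk2
    · rintro ⟨h1, h2, hall⟩
      by_cases hji : j = i
      · exact Or.inl hji
      · have hjgt : i < j := by omega
        refine Or.inr ⟨(hmem j).2 ⟨by omega, h2, fun k hk1 hk2 => hall k (by omega) hk2⟩, ?_⟩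
        have := hall i le_rfl hjgt
        omega
  · show (pvPopL (pvG nums i) i s.1 s.2).2.length = _
    rw [hstk, pvPopL_len]
    exact hlen
  · intro t ht
    show (pvPopL (pvG nums i) i s.1 s.2).2.getD t 0 = _
    rw [hstk, pvPopL_getD nums (pvG nums i) i js s.2 hnd hbnd t, hres t ht]
    by_cases hp : t ∈ js.takeWhile (fun j => decide (pvG nums j < pvG nums i))
    · obtain ⟨htjs, htlt⟩ := (hpopm t).1 hp
      obtain ⟨hti, htn⟩ := hjsgt t htjs
      have hL : pvL nums t = (i : Int) := by
        refine pvScanL_eq nums (pvG nums t) ((t : Int) - 1 - i).toNat ((t : Int) - 1) (i : Int)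
          le_rfl (by omega) (by omega) (fun k hk1 hk2 => ?_) (fun _ => by simpa using htlt)
        have hk0 : (0 : Int) ≤ k := by omega
        have := ((hmem t).1 htjs).2.2 k.toNat (by omega) (by omega)
        simpa [pvG] using this
      rw [if_pos hp, if_neg (by simp [htjs]), if_pos ?side]
      case side =>
        refine ⟨by omega, fun hmem' => ?_⟩
        rcases List.mem_cons.1 hmem' with rfl | h
        · omega
        · exact absurd ((hkeepm t).1 h).2 (by simpa using htlt)
      rw [hL]
      ring
    · rw [if_neg hp]
      by_cases hti : t = i
      · subst hti
        rw [if_neg (fun h => absurd h.1 (by omega)), if_neg (fun h => h.2 List.mem_cons_self)]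
      · by_cases htjs : t ∈ js
        · have hge : ¬ pvG nums t < pvG nums i := fun hl => hp ((hpopm t).2 ⟨htjs, hl⟩)
          have htk : t ∈ js.dropWhile (fun j => decide (pvG nums j < pvG nums i)) :=
            (hkeepm t).2 ⟨htjs, hge⟩
          rw [if_neg (by simp [htjs]), if_neg (by simp [htk])]
        · have htk : t ∉ js.dropWhile (fun j => decide (pvG nums j < pvG nums i)) :=
            fun h => htjs ((hkeepm t).1 h).1
          by_cases hge : i + 1 ≤ t
          · rw [if_pos ⟨hge, htjs⟩, if_pos ⟨by omega, by simp [htk, hti]⟩]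
          · rw [if_neg (by omega), if_neg (by omega)]

theorem pvPass2 (nums : List Int) :
    ∀ i, i ≤ nums.length → ∀ s, pvInv2 nums i s →
    pvInv2 nums 0 (((List.range i).reverse).foldl (pvStep2 nums) s) := by
  intro i
  induction i with
  | zero =>
    intro _ s h
    simpa using h
  | succ i ih =>
    intro hi s h
    rw [List.range_succ, List.reverse_append, List.reverse_singleton, List.singleton_append,
      List.foldl_cons]
    exact ih (by omega) _ (pvStep2_inv nums i s (by omega) h)

theorem pvPass2_final (nums : List Int) (res2 : List Int) (hlen2 : res2.length = nums.length)
    (hres2 : ∀ t, t < nums.length → res2.getD t 0 = (pvR nums t : Int) - t - 1) :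
    (pvFlushL (((List.range nums.length).reverse).foldl (pvStep2 nums) ([], res2)).1
              (((List.range nums.length).reverse).foldl (pvStep2 nums) ([], res2)).2).length = nums.length ∧
    ∀ t, t < nums.length →
      (pvFlushL (((List.range nums.length).reverse).foldl (pvStep2 nums) ([], res2)).1
                (((List.range nums.length).reverse).foldl (pvStep2 nums) ([], res2)).2).getD t 0
        = (pvR nums t : Int) - pvL nums t - 1 := by
  have hinit : pvInv2 nums nums.length ([], res2) := by
    refine ⟨[], rfl, List.Pairwise.nil, List.Pairwise.nil, ?_, hlen2, ?_⟩
    · intro j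
      simp only [List.not_mem_nil, false_iff]
      rintro ⟨h1, h2, _⟩
      omega
    · intro t ht
      rw [hres2 t ht, if_neg (fun h => absurd h.1 (by omega))]
      ring
  obtain ⟨js, hstk, hlt2, hmono, hmem, hlen, hres⟩ := pvPass2 nums nums.length le_rfl _ hinit
  have hnd : js.Nodup := hlt2.imp (fun hab => Nat.ne_of_lt hab)
  have hbnd : ∀ j ∈ js,
      j < (((List.range nums.length).reverse).foldl (pvStep2 nums) ([], res2)).2.length := by
    intro j hj
    rw [hlen]
    exact ((hmem j).1 hj).2.1
  constructor
  · rw [hstk, pvFlushL_len, hlen]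
  · intro t ht
    rw [hstk, pvFlushL_getD nums js _ hnd hbnd t, hres t ht]
    by_cases hjs : t ∈ js
    · have hL : pvL nums t = -1 := by
        refine pvScanL_eq nums (pvG nums t) t ((t : Int) - 1) (-1) (by omega) (by omega) le_rfl
          (fun k hk1 hk2 => ?_) (fun h => absurd h (by omega))
        have := ((hmem t).1 hjs).2.2 k.toNat (Nat.zero_le _) (by omega)
        simpa [pvG] using this
      rw [if_pos hjs, if_neg (fun h => h.2 hjs), hL]
      ring
    · rw [if_neg hjs, if_pos ⟨Nat.zero_le _, hjs⟩]
      ring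

theorem pv_final (nums : List Int) :
    (maximumLengthOfRanges nums).length = nums.length ∧
    ∀ t, t < nums.length →
      (maximumLengthOfRanges nums).getD t 0 = (pvR nums t : Int) - pvL nums t - 1 := by
  
  obtain ⟨hlen2, hres2⟩ := pvRes1 nums
  exact pvPass2_final nums _ hlen2 hres2

-- ===== VERDICT (by name: the statement is the Claim_ definition above) =====
theorem maximumLengthOfRanges_spec : Claim_equal_maximumLengthOfRanges := by
  
  intro nums _
  unfold Spec_maximumLengthOfRanges
  obtain ⟨hlen, hval⟩ := pv_final nums
  have hlen' : (maximumLengthOfRanges_alt nums).length = nums.length := by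
    simp [maximumLengthOfRanges_alt]
  apply List.ext_getElem (by rw [hlen, hlen'])
  intro t h1 h2
  have ht : t < nums.length := by rwa [hlen] at h1
  have hA : (maximumLengthOfRanges nums)[t] = (pvR nums t : Int) - pvL nums t - 1 := by
    rw [← List.getD_eq_getElem _ 0 h1]
    exact hval t ht
  rw [hA]
  simp only [maximumLengthOfRanges_alt, List.getElem_map, List.getElem_range]
  rfl
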